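-- pv_equiv track=rewrite | github.com/epi2me-labs/wf-teloseq | bin/workflow_glue/deduplicate.py | remove_homopolymers
-- ===== SOURCE A (Python) =====
-- def remove_homopolymers(sequence, length=5):
--     """
--     Temporarily remove homopolymers of a specified length or more.
--
--     The original sequence is not modified; this is for comparison only.
--     """
--     result = []
--     i = 0
--     while i < len(sequence):
--         if i <= len(sequence) - length and len(set(sequence[i:i + length])) == 1:
--             i += length
--             while i < len(sequence) and sequence[i] == sequence[i - 1]:
--                 i += 1
--         else:
--             result.append(sequence[i])
--             i += 1
--     return ''.join(result)
-- ===== SOURCE B (Python) =====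
-- def remove_homopolymers(sequence, length=5):
--     """Single run-length pass: drop each maximal run of one character whose
--     run length reaches `length` (for length <= 0 nothing is dropped)."""
--     parts = []
--     run_char = ''
--     run_len = 0
--     for ch in sequence:
--         if ch == run_char:
--             run_len += 1
--         else:
--             if length <= 0 or run_len < length:
--                 parts.append(run_char * run_len)
--             run_char = ch
--             run_len = 1
--     if length <= 0 or run_len < length:
--         parts.append(run_char * run_len)
--     return ''.join(parts)
-- ===== Notes on version B (the rewrite author's own statement) =====
-- stated objective: faster
-- what changed: Replaces the windowed set(sequence[i:i+length]) detection with index jumps by a single run-length pass that tracks the current run (char, count) and emits each maximal run only when it is shorter than length (or length <= 0).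
-- outside the precondition, e.g. on remove_homopolymers('aa', -1): A returns '', B returns 'aa'; on remove_homopolymers('ab', -1): A does not finish within the time limit, B returns 'ab'
import Mathlib
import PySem

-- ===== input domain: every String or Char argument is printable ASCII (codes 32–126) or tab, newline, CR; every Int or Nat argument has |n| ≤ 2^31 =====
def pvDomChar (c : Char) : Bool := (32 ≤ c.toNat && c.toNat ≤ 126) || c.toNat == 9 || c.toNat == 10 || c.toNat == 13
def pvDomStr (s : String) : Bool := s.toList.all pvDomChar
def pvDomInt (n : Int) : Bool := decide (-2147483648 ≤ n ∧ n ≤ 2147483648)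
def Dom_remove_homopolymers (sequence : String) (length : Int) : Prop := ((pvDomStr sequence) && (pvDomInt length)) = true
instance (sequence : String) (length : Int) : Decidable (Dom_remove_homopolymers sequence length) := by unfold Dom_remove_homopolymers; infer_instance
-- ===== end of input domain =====

-- B replaces A's windowed set-detection with one run-length pass over the string (measured faster by a constant factor in Python).
-- ===== PORT A =====
-- inner 'while i < len(sequence) and sequence[i] == sequence[i - 1]: i += 1' (the fuel only makes the
-- loop total in Lean; within Pre_ the fuel sequence.length always suffices, proved in pvSkipA_run below)
def pvSkipA (l : List Char) (i : Int) : Nat → Int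
  | 0 => i
  | fuel + 1 =>
    if i < (l.length : Int) ∧ PySem.List.pyGet? l i = PySem.List.pyGet? l (i - 1)
    then pvSkipA l (i + 1) fuel
    else i

-- outer 'while i < len(sequence): …' accumulating result; fuel = sequence.length suffices within Pre_
def pvLoopA (l : List Char) (len : Int) (i : Int) (res : List Char) : Nat → List Char
  | 0 => res
  | fuel + 1 =>
    if i < (l.length : Int) then
      if i ≤ (l.length : Int) - len ∧
         (PySem.Set.ofList (PySem.List.slice l (some i) (some (i + len)))).length = 1 then
        pvLoopA l len (pvSkipA l (i + len) l.length) res fuel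
      else
        pvLoopA l len (i + 1) (res ++ [PySem.List.pyGetD l i 'a']) fuel
    else res

def remove_homopolymers (sequence : String) (length : Int) : String :=
  String.ofList (pvLoopA sequence.toList length 0 [] sequence.toList.length)

-- ===== PORT B =====
-- the loop body of Source B: state (parts, run_char, run_len)
def pvStepB (len : Int) (st : List (List Char) × List Char × Int) (ch : Char) :
    List (List Char) × List Char × Int :=
  if [ch] = st.2.1 then (st.1, st.2.1, st.2.2 + 1)
  else
    ((if len ≤ 0 ∨ st.2.2 < len then st.1 ++ [PySem.List.pyRepeat st.2.1 st.2.2] else st.1),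
     [ch], 1)

def remove_homopolymers_alt (sequence : String) (length : Int) : String :=
  let st := sequence.toList.foldl (pvStepB length) ([], [], 0)
  let parts :=
    if length ≤ 0 ∨ st.2.2 < length then st.1 ++ [PySem.List.pyRepeat st.2.1 st.2.2] else st.1
  String.ofList (PySem.Chars.join [] parts)

-- ===== PRECONDITION & SPEC =====
-- Pre_ excludes negative lengths with -len(sequence) < length < 0: there Python's slice stop i+length
-- wraps to the end of the string, and A diverges (e.g. ('ab', -1)) or drops the characters the
-- wrapped slice happens to cover (e.g. ('aa', -1)); B keeps the whole string there.
def Pre_remove_homopolymers (sequence : String) (length : Int) : Prop :=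
  0 ≤ length ∨ length ≤ -(sequence.toList.length : Int)
instance (sequence : String) (length : Int) : Decidable (Pre_remove_homopolymers sequence length) := by
  unfold Pre_remove_homopolymers; infer_instance

def pvWitness_remove_homopolymers : String × Int := ("aabbbba", 3)

def Spec_remove_homopolymers (sequence : String) (length : Int) (out : String) : Prop :=
  out = remove_homopolymers_alt sequence length
instance (sequence : String) (length : Int) (out : String) :
    Decidable (Spec_remove_homopolymers sequence length out) := by
  unfold Spec_remove_homopolymers; infer_instance

-- ===== CLAIM (what is proved, stated in full; the proofs are below) =====
def Claim_equal_remove_homopolymers : Prop :=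
  ∀ (sequence : String) (length : Int), Dom_remove_homopolymers sequence length →
    Pre_remove_homopolymers sequence length →
    Spec_remove_homopolymers sequence length (remove_homopolymers sequence length)

-- ===== LEMMAS AND PROOFS =====

-- the common run-based specification both ports are reduced to
def pvSpec (len : Int) : List Char → List Char
  | [] => []
  | c :: t =>
    (if 1 ≤ len ∧ len ≤ ((t.takeWhile (· == c)).length + 1 : Int)
     then []
     else List.replicate ((t.takeWhile (· == c)).length + 1) c) ++
    pvSpec len (t.dropWhile (· == c))
termination_by l => l.length
decreasing_by
  simp only [List.length_cons]
  exact Nat.lt_succ_of_le (List.length_dropWhile_le _ _)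

lemma pvSpec_cons_of_short (len : Int) (c : Char) (t : List Char)
    (h : ¬ (1 ≤ len ∧ len ≤ ((t.takeWhile (· == c)).length + 1 : Int))) :
    pvSpec len (c :: t) = c :: pvSpec len t := by
  cases t with
  | nil =>
    simp [pvSpec]
    intro h1
    simp at h
    omega
  | cons d t' =>
    by_cases hdc : d = c
    · subst hdc
      have htw : (List.takeWhile (· == d) (d :: t')) = d :: List.takeWhile (· == d) t' := by
        simp
      have hdw : (List.dropWhile (· == d) (d :: t')) = List.dropWhile (· == d) t' := by
        simp
      have h' : ¬ (1 ≤ len ∧ len ≤ ((t'.takeWhile (· == d)).length + 1 : Int)) := by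
        rw [htw] at h; simp at h ⊢; intro h1; have := h h1; omega
      rw [pvSpec, pvSpec, htw, hdw]
      rw [if_neg (by rw [htw] at h; simpa using h), if_neg h']
      simp [List.replicate_succ]
    · have htw : (List.takeWhile (· == c) (d :: t')) = [] := by
        simp [hdc]
      have hdw : (List.dropWhile (· == c) (d :: t')) = d :: t' := by
        simp [hdc]
      rw [pvSpec, htw, hdw]
      rw [if_neg (by rw [htw] at h; simpa using h)]
      simp

-- B: characterization of the fold while inside a run
lemma pvB_run (len : Int) :
    ∀ (t : List Char) (parts : List (List Char)) (c : Char) (n : Nat),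
      (let st := t.foldl (pvStepB len) (parts, [c], ((n : Int) + 1))
       (if len ≤ 0 ∨ st.2.2 < len then st.1 ++ [PySem.List.pyRepeat st.2.1 st.2.2] else st.1).flatten)
      = parts.flatten ++
        (if len ≤ 0 ∨ ((n : Int) + 1 + (t.takeWhile (· == c)).length) < len
         then List.replicate (n + 1 + (t.takeWhile (· == c)).length) c else []) ++
        pvSpec len (t.dropWhile (· == c)) := by
  intro t
  induction t with
  | nil =>
    intro parts c n
    simp only [List.foldl_nil, List.takeWhile_nil, List.dropWhile_nil, pvSpec,
      List.length_nil, Nat.cast_zero]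
    rw [PySem.List.pyRepeat_singleton]
    split_ifs with h1 h2 <;>
      first
        | (exfalso; omega)
        | (have hh : ((n : Int) + 1).toNat = n + 1 := by omega
           simp [hh])
  | cons d t' ih =>
    intro parts c n
    by_cases hdc : d = c
    · subst hdc
      simp only [List.foldl_cons]
      have hstep : pvStepB len (parts, [d], ((n : Int) + 1)) d = (parts, [d], ((n+1 : Nat) : Int) + 1) := by
        simp [pvStepB]
      rw [hstep]
      have := ih parts d (n+1)
      simp only at this
      rw [this]
      have htw : (List.takeWhile (· == d) (d :: t')) = d :: List.takeWhile (· == d) t' := by simp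
      have hdw : (List.dropWhile (· == d) (d :: t')) = List.dropWhile (· == d) t' := by simp
      rw [htw, hdw]
      simp only [List.length_cons]
      have ec : (len ≤ 0 ∨ ((n+1 : Nat) : Int) + 1 + ((List.takeWhile (· == d) t').length : Int) < len)
          = (len ≤ 0 ∨ (n : Int) + 1 + (((List.takeWhile (· == d) t').length + 1 : Nat) : Int) < len) := by
        apply propext; push_cast; omega
      have en : n + 1 + 1 + (List.takeWhile (· == d) t').length
          = n + 1 + ((List.takeWhile (· == d) t').length + 1) := by omega
      simp only [ec, en]
    · simp only [List.foldl_cons]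
      have hstep : pvStepB len (parts, [c], ((n : Int) + 1)) d
          = ((if len ≤ 0 ∨ ((n : Int) + 1) < len
              then parts ++ [PySem.List.pyRepeat [c] ((n : Int) + 1)] else parts),
             [d], ((0 : Nat) : Int) + 1) := by
        simp [pvStepB, hdc]
      rw [hstep]
      have := ih (if len ≤ 0 ∨ ((n : Int) + 1) < len
              then parts ++ [PySem.List.pyRepeat [c] ((n : Int) + 1)] else parts) d 0
      simp only at this
      rw [this]
      have htw : (List.takeWhile (· == c) (d :: t')) = [] := by simp [hdc]
      have hdw : (List.dropWhile (· == c) (d :: t')) = d :: t' := by simp [hdc]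
      rw [htw, hdw, pvSpec]
      rw [PySem.List.pyRepeat_singleton]
      have hh : ((n : Int) + 1).toNat = n + 1 := by omega
      simp only [List.length_nil, Nat.cast_zero, hh]
      split_ifs <;>
        first
          | (exfalso; omega)
          | (simp; try omega)

lemma pvJoin_nil (parts : List (List Char)) : PySem.Chars.join [] parts = parts.flatten := by
  simp [PySem.Chars.join, List.intercalate]
  induction parts with
  | nil => simp
  | cons p ps ih => cases ps <;> simp_all [List.intersperse]

lemma pvB_eq_spec (sequence : String) (len : Int) :
    remove_homopolymers_alt sequence len = String.ofList (pvSpec len sequence.toList) := by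
  unfold remove_homopolymers_alt
  simp only [pvJoin_nil]
  cases hl : sequence.toList with
  | nil =>
    have h0 : (len ≤ 0 ∨ (0:Int) < len) := by omega
    simp [pvSpec, if_pos h0, PySem.List.pyRepeat]
  | cons c t =>
    simp only [List.foldl_cons]
    have hstep : pvStepB len ([], [], 0) c = ([[]], [c], ((0 : Nat) : Int) + 1) := by
      simp [pvStepB]
      rw [if_pos (by omega : len ≤ 0 ∨ (0:Int) < len)]
      rfl
    rw [hstep]
    have := pvB_run len t [[]] c 0
    simp only at this
    rw [this]
    rw [pvSpec]
    have ec : (len ≤ 0 ∨ ((0:Nat) : Int) + 1 + ((List.takeWhile (· == c) t).length : Int) < len)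
        = ¬ (1 ≤ len ∧ len ≤ (((List.takeWhile (· == c) t).length : Int) + 1)) := by
      apply propext; push_cast; omega
    simp only [ec]
    by_cases hc : 1 ≤ len ∧ len ≤ (((List.takeWhile (· == c) t).length : Int) + 1)
    · simp [hc]
    · simp only [hc, not_false_eq_true, if_true]
      simp
      rw [Nat.add_comm]

lemma pvTakeWhile_getElem? (p : Char → Bool) (t : List Char) (m : Nat)
    (h : m < (t.takeWhile p).length) : t[m]? = (t.takeWhile p)[m]? := by
  obtain ⟨r, hr⟩ := List.takeWhile_prefix (l := t) p
  conv_lhs => rw [← hr]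
  rw [List.getElem?_append_left h]

lemma pvTakeWhile_getElem_run (c : Char) (t : List Char) (m : Nat)
    (h : m < (t.takeWhile (· == c)).length) :
    t[m]? = some c := by
  rw [pvTakeWhile_getElem? _ _ _ h]
  rw [List.getElem?_eq_getElem h]
  have hm : (t.takeWhile (· == c))[m] ∈ t.takeWhile (· == c) := List.getElem_mem h
  have := List.mem_takeWhile_imp hm
  simp at this
  rw [this]

lemma pvTakeWhile_boundary (p : Char → Bool) (t : List Char)
    (h : (t.takeWhile p).length < t.length) :
    p (t[(t.takeWhile p).length]'h) = false := by
  induction t with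
  | nil => simp at h
  | cons a t ih =>
    by_cases hp : p a
    · simp [hp] at h ⊢
      exact ih (by omega)
    · simp [hp] at h ⊢

-- chars of the run  c :: takeWhile (· == c) t  inside  pre ++ c :: t
lemma pvRunChar (pre : List Char) (c : Char) (t : List Char) (m : Nat)
    (hm : m ≤ (t.takeWhile (· == c)).length) :
    PySem.List.pyGet? (pre ++ c :: t) ((pre.length + m : Nat) : Int) = some c := by
  rw [PySem.List.pyGet?_natCast]
  rw [List.getElem?_append_right (by omega)]
  have : pre.length + m - pre.length = m := by omega
  rw [this]
  cases m with
  | zero => simp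
  | succ m' =>
    simp only [List.getElem?_cons_succ]
    exact pvTakeWhile_getElem_run c t m' (by omega)

-- A's inner while loop lands exactly at the end of the current run
lemma pvSkipA_run (pre : List Char) (c : Char) (t : List Char) :
    ∀ (fuel j : Nat), 1 ≤ j → j ≤ (t.takeWhile (· == c)).length + 1 →
      (t.takeWhile (· == c)).length + 1 - j ≤ fuel →
      pvSkipA (pre ++ c :: t) (((pre.length + j : Nat) : Int)) fuel
        = ((pre.length + ((t.takeWhile (· == c)).length + 1) : Nat) : Int) := by
  intro fuel
  induction fuel with
  | zero =>
    intro j h1 h2 h3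
    have : j = (t.takeWhile (· == c)).length + 1 := by omega
    subst this
    rfl
  | succ fuel ih =>
    intro j h1 h2 h3
    set k := (t.takeWhile (· == c)).length with hk
    have hkt : k ≤ t.length := (List.takeWhile_prefix _).length_le
    by_cases hj : j = k + 1
    · subst hj
      rw [pvSkipA]
      rw [if_neg]
      intro ⟨hlt, heq⟩
      have hlen : (pre ++ c :: t).length = pre.length + 1 + t.length := by simp; omega
      have hkt' : k < t.length := by
        rw [hlen] at hlt
        push_cast at hlt
        omega
      have hprev : ((pre.length + (k + 1) : Nat) : Int) - 1 = ((pre.length + k : Nat) : Int) := by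
        push_cast; ring
      rw [hprev, pvRunChar pre c t k (le_refl _)] at heq
      have hcur : PySem.List.pyGet? (pre ++ c :: t) ((pre.length + (k + 1) : Nat) : Int)
          = t[k]? := by
        rw [PySem.List.pyGet?_natCast]
        rw [List.getElem?_append_right (by omega)]
        have : pre.length + (k + 1) - pre.length = k + 1 := by omega
        rw [this]
        simp
      rw [hcur, List.getElem?_eq_getElem hkt'] at heq
      have hb := pvTakeWhile_boundary (· == c) t (by omega)
      simp only [← hk] at hb
      simp at heq hb
      exact hb heq
    · have hjk : j ≤ k := by omega
      rw [pvSkipA]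
      rw [if_pos]
      · have : ((pre.length + j : Nat) : Int) + 1 = ((pre.length + (j + 1) : Nat) : Int) := by
          push_cast; ring
        rw [this]
        exact ih (j + 1) (by omega) (by omega) (by omega)
      · constructor
        · have hlen : (pre ++ c :: t).length = pre.length + 1 + t.length := by simp; omega
          rw [hlen]
          push_cast
          omega
        · have hprev : ((pre.length + j : Nat) : Int) - 1 = ((pre.length + (j - 1) : Nat) : Int) := by
            push_cast
            omega
          rw [hprev, pvRunChar pre c t j hjk, pvRunChar pre c t (j - 1) (by omega)]

lemma pvSetLen1 (c : Char) (r : List Char) :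
    ((PySem.Set.ofList (c :: r)).length = 1) ↔ (∀ x ∈ r, x = c) := by
  constructor
  · intro h x hx
    obtain ⟨a, ha⟩ := List.length_eq_one_iff.mp h
    have hc : c ∈ PySem.Set.ofList (c :: r) := by
      rw [PySem.Set.mem_ofList]; simp
    have hx' : x ∈ PySem.Set.ofList (c :: r) := by
      rw [PySem.Set.mem_ofList]; simp [hx]
    rw [ha] at hc hx'
    simp at hc hx'
    rw [hx', hc]
  · intro h
    have hmem : ∀ y, y ∈ PySem.Set.ofList (c :: r) ↔ y = c := by
      intro y
      rw [PySem.Set.mem_ofList]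
      constructor
      · intro hy
        rcases List.mem_cons.mp hy with h' | h'
        · exact h'
        · exact h _ h'
      · intro hy; simp [hy]
    have hnd := PySem.Set.nodup_ofList (xs := c :: r)
    cases hS : PySem.Set.ofList (c :: r) with
    | nil =>
      exfalso
      have := (hmem c).mpr rfl
      rw [hS] at this
      simp at this
    | cons a ys =>
      have ha : a = c := (hmem a).mp (by rw [hS]; simp)
      cases ys with
      | nil => simp
      | cons b ys' =>
        exfalso
        have hb : b = c := (hmem b).mp (by rw [hS]; simp)
        rw [hS] at hnd
        simp [ha, hb] at hnd

lemma pvTake_all_le_takeWhile (c : Char) :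
    ∀ (t : List Char) (m : Nat), m ≤ t.length → (∀ x ∈ t.take m, x = c) →
      m ≤ (t.takeWhile (· == c)).length := by
  intro t
  induction t with
  | nil => intro m hm _; simpa using hm
  | cons a t' ih =>
    intro m hm hall
    cases m with
    | zero => omega
    | succ m' =>
      have ha : a = c := hall a (by simp)
      simp [ha]
      have := ih m' (by simpa using hm) (fun x hx => hall x (by simp [hx]))
      omega

lemma pvTake_of_le_takeWhile (c : Char) (t : List Char) (m : Nat)
    (hm : m ≤ (t.takeWhile (· == c)).length) :
    ∀ x ∈ t.take m, x = c := by
  intro x hx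
  obtain ⟨r, hr⟩ := List.takeWhile_prefix (l := t) (· == c)
  rw [← hr, List.take_append_of_le_length hm] at hx
  have := List.mem_takeWhile_imp (List.mem_of_mem_take hx)
  simpa using this

-- A's window condition holds exactly when a run of at least `len` starts here (within Pre_)
lemma pvCond_iff (len : Int) (pre : List Char) (c : Char) (t : List Char)
    (hpre : 0 ≤ len ∨ len ≤ -(((pre ++ c :: t).length : Int))) :
    ((((pre.length : Nat) : Int) ≤ ((pre ++ c :: t).length : Int) - len ∧
      (PySem.Set.ofList (PySem.List.slice (pre ++ c :: t) (some ((pre.length : Nat) : Int))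
        (some (((pre.length : Nat) : Int) + len)))).length = 1))
    ↔ (1 ≤ len ∧ len ≤ ((t.takeWhile (· == c)).length : Int) + 1) := by
  set l := pre ++ c :: t with hl
  have hlen : l.length = pre.length + 1 + t.length := by simp [hl]; omega
  by_cases hpos : 1 ≤ len
  · have hslice : PySem.List.slice l (some ((pre.length : Nat) : Int))
        (some (((pre.length : Nat) : Int) + len)) = (c :: t).take len.toNat := by
      rw [PySem.List.slice_toNat _ (by positivity) (by omega)]
      have h1 : ((pre.length : Nat) : Int).toNat = pre.length := by omega
      have h2 : (((pre.length : Nat) : Int) + len).toNat = pre.length + len.toNat := by omega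
      rw [h1, h2, hl, List.drop_left]
      congr 1
      omega
    rw [hslice]
    have hto : (c :: t).take len.toNat = c :: t.take (len.toNat - 1) := by
      cases hn : len.toNat with
      | zero => omega
      | succ n' => simp
    rw [hto, pvSetLen1]
    set k := (t.takeWhile (· == c)).length with hk
    have hkt : k ≤ t.length := (List.takeWhile_prefix _).length_le
    constructor
    · intro ⟨hfit, hall⟩
      refine ⟨hpos, ?_⟩
      have hfit' : len ≤ t.length + 1 := by rw [hlen] at hfit; push_cast at hfit ⊢; omega
      have := pvTake_all_le_takeWhile c t (len.toNat - 1) (by omega) hall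
      omega
    · intro ⟨_, hle⟩
      constructor
      · rw [hlen]; push_cast; omega
      · exact pvTake_of_le_takeWhile c t (len.toNat - 1) (by omega)
  · constructor
    · intro ⟨_, hset⟩
      exfalso
      have hempty : PySem.List.slice l (some ((pre.length : Nat) : Int))
          (some (((pre.length : Nat) : Int) + len)) = [] := by
        rcases hpre with h0 | hneg
        · have : len = 0 := by omega
          subst this
          simp
          rw [PySem.List.slice_toNat _ (by positivity) (by positivity)]
          simp
        · apply List.eq_nil_of_length_eq_zero
          rw [PySem.List.length_slice]
          have hb : ((pre.length : Nat) : Int) + len < 0 := by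
            rw [hlen] at hneg; push_cast at hneg; omega
          have hbeq : ((pre.length : Nat) : Int) + len
              = -(((-(((pre.length : Nat) : Int) + len)).toNat : Nat) : Int) := by omega
          rw [hbeq, PySem.List.clampIdx_neg_natCast _ _ (by omega), PySem.List.clampIdx_natCast]
          rw [hlen] at hneg ⊢
          push_cast at hneg
          omega
      rw [hempty] at hset
      simp [PySem.Set.ofList] at hset
    · intro ⟨h1, _⟩; omega

lemma pvDropWhile_eq_drop (c : Char) (t : List Char) :
    t.dropWhile (· == c) = t.drop (t.takeWhile (· == c)).length := by
  induction t with
  | nil => simp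
  | cons a t' ih =>
    by_cases hp : a = c
    · simp [hp, ih]
    · simp [hp]

-- A's outer loop computes pvSpec of the remaining suffix
lemma pvA_loop (len : Int) :
    ∀ (fuel : Nat) (pre suf res : List Char),
      (0 ≤ len ∨ len ≤ -(((pre ++ suf).length : Int))) →
      suf.length ≤ fuel →
      pvLoopA (pre ++ suf) len ((pre.length : Nat) : Int) res fuel = res ++ pvSpec len suf := by
  intro fuel
  induction fuel with
  | zero =>
    intro pre suf res _ hf
    have : suf = [] := List.eq_nil_of_length_eq_zero (by omega)
    subst this
    simp [pvLoopA, pvSpec]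
  | succ fuel ih =>
    intro pre suf res hpre hf
    cases suf with
    | nil =>
      rw [pvLoopA]
      rw [if_neg (by simp)]
      simp [pvSpec]
    | cons c t =>
      set l := pre ++ c :: t with hl
      have hlen : l.length = pre.length + 1 + t.length := by simp [hl]; omega
      set k := (t.takeWhile (· == c)).length with hk
      have hkt : k ≤ t.length := (List.takeWhile_prefix _).length_le
      have hf' : t.length ≤ fuel := by simpa using hf
      rw [pvLoopA]
      rw [if_pos (by rw [hlen]; push_cast; omega)]
      by_cases hC : 1 ≤ len ∧ len ≤ (k : Int) + 1
      · rw [if_pos ((pvCond_iff len pre c t hpre).mpr hC)]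
        have hi : ((pre.length : Nat) : Int) + len = ((pre.length + len.toNat : Nat) : Int) := by
          push_cast; omega
        have hskip := pvSkipA_run pre c t l.length len.toNat (by omega) (by omega) (by omega)
        rw [← hl, ← hk] at hskip
        rw [hi, hskip]
        have hsplit : pre ++ c :: t = (pre ++ c :: t.take k) ++ t.drop k := by
          simp [List.append_assoc]
        have hplen : (pre ++ c :: t.take k).length = pre.length + (k + 1) := by
          simp; omega
        have := ih (pre ++ c :: t.take k) (t.drop k) res
          (by rw [← hsplit, ← hl]; exact hpre)
          (by simp; omega)
        rw [hplen] at this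
        rw [hl, hsplit, this]
        rw [pvSpec, ← hk]
        rw [if_pos hC]
        rw [pvDropWhile_eq_drop, ← hk]
        simp
      · rw [if_neg (fun h => hC ((pvCond_iff len pre c t hpre).mp h))]
        have hget : PySem.List.pyGetD l ((pre.length : Nat) : Int) 'a' = c := by
          rw [PySem.List.pyGetD_natCast]
          rw [hl]
          rw [List.getD_eq_getElem?_getD]
          rw [List.getElem?_append_right (le_refl _)]
          simp
        have hi1 : ((pre.length : Nat) : Int) + 1 = (((pre ++ [c]).length : Nat) : Int) := by
          simp
        have hassoc : pre ++ c :: t = (pre ++ [c]) ++ t := by simp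
        have := ih (pre ++ [c]) t (res ++ [c])
          (by rw [← hassoc, ← hl]; exact hpre)
          (by simpa using hf)
        rw [hget, hi1, hl, hassoc, this]
        rw [pvSpec_cons_of_short len c t (by rw [← hk]; exact hC)]
        simp

-- ===== VERDICT (by name: the statement is the Claim_ definition above) =====
theorem remove_homopolymers_spec : Claim_equal_remove_homopolymers := by
  intro s len _ hpre
  show remove_homopolymers s len = remove_homopolymers_alt s len
  rw [pvB_eq_spec]
  unfold remove_homopolymers
  have := pvA_loop len s.toList.length [] s.toList [] (by simpa using hpre) (le_refl _)
  simpa using congrArg String.ofList this
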